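-- pv_equiv track=rewrite | github.com/EmilyWebber/Healthy-Neighborhoods | Website/maps/Analysis/correlations.py | initialize_city_dict
-- ===== SOURCE A (Python) =====
-- DEFAULT_KEY = None
--
-- DEFAULT_VALUE = []
--
-- def initialize_city_dict(headers):
--     '''
--     Takes a list of headers, creates an inner dictionary for each variable
--     With every other variable and the default key
--     '''
--     city = {}
--     for i in headers:
--         other = [x for x in headers if x != i]
--         inner = {DEFAULT_KEY:DEFAULT_VALUE}
--         for each in other:
--             inner[each] = DEFAULT_VALUE
--         city[i] = inner
--     return city
-- ===== SOURCE B (Python) =====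
-- DEFAULT_KEY = None
--
-- DEFAULT_VALUE = []
--
-- def initialize_city_dict(headers):
--     '''
--     Build one template dict (default key + every header) once, then derive
--     each inner dict as a copy of the template with the header's own key popped.
--     '''
--     template = {DEFAULT_KEY: DEFAULT_VALUE}
--     for h in headers:
--         template[h] = DEFAULT_VALUE
--     city = {}
--     for i in headers:
--         inner = dict(template)
--         inner.pop(i, None)
--         city[i] = inner
--     return city
-- ===== Notes on version B (the rewrite author's own statement) =====
-- stated objective: alternative
-- what changed: B builds one template dict (default None key plus every header) once and derives each inner dict as a copy of the template with the header's own key popped, instead of A's nested pass that re-filters the header list and rebuilds each inner dict from scratch.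
import Mathlib
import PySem

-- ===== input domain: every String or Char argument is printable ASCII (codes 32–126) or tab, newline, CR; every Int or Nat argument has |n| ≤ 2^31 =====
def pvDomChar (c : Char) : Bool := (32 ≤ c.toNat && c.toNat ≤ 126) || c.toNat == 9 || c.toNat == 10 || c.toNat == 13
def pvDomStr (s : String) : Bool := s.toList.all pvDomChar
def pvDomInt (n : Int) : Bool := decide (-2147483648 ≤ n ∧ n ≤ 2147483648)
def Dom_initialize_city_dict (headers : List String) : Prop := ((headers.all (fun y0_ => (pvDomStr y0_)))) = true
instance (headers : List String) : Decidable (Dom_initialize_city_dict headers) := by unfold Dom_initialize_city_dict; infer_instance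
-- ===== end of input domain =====

-- B builds the inner dicts from one prebuilt template dict (copy + pop own key) instead of
-- re-filtering the header list and rebuilding each inner dict from scratch (objective: alternative).

-- ===== PORT A =====
def initialize_city_dict (headers : List String) : List (String × List (Option String × List Int)) :=
  let city : PySem.Dict String (PySem.Dict (Option String) (List Int)) :=
    headers.foldl (fun city i =>
      let other := headers.filter (fun x => x != i)
      let inner : PySem.Dict (Option String) (List Int) :=
        other.foldl (fun inner each => inner.insert (some each) ([] : List Int))
          (PySem.Dict.ofList [(none, ([] : List Int))])
      city.insert i inner) PySem.Dict.empty
  city.items.map (fun p => (p.1, p.2.items))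

-- ===== PORT B =====
def initialize_city_dict_alt (headers : List String) : List (String × List (Option String × List Int)) :=
  let template : PySem.Dict (Option String) (List Int) :=
    headers.foldl (fun t h => t.insert (some h) ([] : List Int))
      (PySem.Dict.ofList [(none, ([] : List Int))])
  let city : PySem.Dict String (PySem.Dict (Option String) (List Int)) :=
    headers.foldl (fun c i => c.insert i (template.erase (some i))) PySem.Dict.empty
  city.items.map (fun p => (p.1, p.2.items))

-- ===== PRECONDITION & SPEC =====
def Spec_initialize_city_dict (headers : List String) (out : List (String × List (Option String × List Int))) : Prop := out = initialize_city_dict_alt headers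
instance (headers : List String) (out : List (String × List (Option String × List Int))) : Decidable (Spec_initialize_city_dict headers out) := by unfold Spec_initialize_city_dict; infer_instance

-- ===== CLAIM (what is proved, stated in full; the proofs are below) =====
def Claim_equal_initialize_city_dict : Prop := ∀ (headers : List String), Dom_initialize_city_dict headers → Spec_initialize_city_dict headers (initialize_city_dict headers)

-- ===== LEMMAS AND PROOFS =====

theorem pv_filter_map_insert {κ ν : Type} [BEq κ] [LawfulBEq κ] (l : List (κ × ν)) (k : κ) (v : ν) :
    (l.map (fun p => if p.1 == k then (k, v) else p)).filter (fun p => !(p.1 == k))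
      = l.filter (fun p => !(p.1 == k)) := by
  induction l with
  | nil => rfl
  | cons p t ih =>
    by_cases h : p.1 == k <;> simp [h, ih]

theorem pv_erase_insert_self {κ ν : Type} [BEq κ] [LawfulBEq κ]
    (d : PySem.Dict κ ν) (k : κ) (v : ν) :
    (d.insert k v).erase k = d.erase k := by
  apply PySem.Dict.ext
  simp only [PySem.Dict.insert, PySem.Dict.erase]
  split_ifs with h
  · exact pv_filter_map_insert d.items k v
  · simp [List.filter_append]

theorem pv_filter_map_comm {κ ν : Type} [BEq κ] [LawfulBEq κ] (l : List (κ × ν)) (h k : κ) (v : ν)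
    (hne : h ≠ k) :
    (l.map (fun p => if p.1 == h then (h, v) else p)).filter (fun p => !(p.1 == k))
      = (l.filter (fun p => !(p.1 == k))).map (fun p => if p.1 == h then (h, v) else p) := by
  induction l with
  | nil => rfl
  | cons p t ih =>
    by_cases hp : p.1 == h
    · have hpk : ¬ (p.1 == k) = true := by
        simp_all
      simp [hp, hpk, hne, ih]
    · by_cases hk : p.1 == k <;> simp [hp, hk, ih]

theorem pv_contains_erase_of_ne {κ ν : Type} [BEq κ] [LawfulBEq κ]
    (d : PySem.Dict κ ν) (h k : κ) (hne : h ≠ k) :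
    (d.erase k).contains h = d.contains h := by
  simp only [PySem.Dict.erase, PySem.Dict.contains]
  induction d.items with
  | nil => rfl
  | cons p t ih =>
    by_cases hp : p.1 == h
    · have hpk : ¬ (p.1 == k) = true := by simp_all
      simp [hp, hpk]
    · by_cases hk : p.1 == k <;> simp [hp, hk, ih]

theorem pv_erase_insert_of_ne {κ ν : Type} [BEq κ] [LawfulBEq κ]
    (d : PySem.Dict κ ν) (h k : κ) (v : ν) (hne : h ≠ k) :
    (d.insert h v).erase k = (d.erase k).insert h v := by
  apply PySem.Dict.ext
  simp only [PySem.Dict.insert, pv_contains_erase_of_ne d h k hne]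
  split_ifs with hc
  · simp only [PySem.Dict.erase]
    exact pv_filter_map_comm d.items h k v hne
  · simp only [PySem.Dict.erase]
    simp [List.filter_append, hne]

theorem pv_foldl_insert_erase (l : List String) (i : String)
    (d : PySem.Dict (Option String) (List Int)) :
    (l.foldl (fun t h => t.insert (some h) ([] : List Int)) d).erase (some i)
      = (l.filter (fun x => x != i)).foldl
          (fun t h => t.insert (some h) ([] : List Int)) (d.erase (some i)) := by
  induction l generalizing d with
  | nil => rfl
  | cons h t ih =>
    by_cases hi : h = i
    · subst hi
      simpa [List.filter_cons, pv_erase_insert_self] using ih (d.insert (some h) [])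
    · have hne : (some h : Option String) ≠ some i := by simp [hi]
      simp only [List.foldl_cons, List.filter_cons]
      rw [ih (d.insert (some h) []), pv_erase_insert_of_ne d (some h) (some i) [] hne]
      simp [hi]

theorem pv_inner_eq (headers : List String) (i : String) :
    (headers.filter (fun x => x != i)).foldl
        (fun inner each => inner.insert (some each) ([] : List Int))
        (PySem.Dict.ofList [(none, ([] : List Int))])
      = (headers.foldl (fun t h => t.insert (some h) ([] : List Int))
          (PySem.Dict.ofList [(none, ([] : List Int))])).erase (some i) := by
  rw [pv_foldl_insert_erase]
  rfl

-- ===== VERDICT (by name: the statement is the Claim_ definition above) =====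
theorem initialize_city_dict_spec : Claim_equal_initialize_city_dict := by
  intro headers _
  unfold Spec_initialize_city_dict initialize_city_dict initialize_city_dict_alt
  have hfun :
      (fun (city : PySem.Dict String (PySem.Dict (Option String) (List Int))) (i : String) =>
          city.insert i ((headers.filter (fun x => x != i)).foldl
            (fun inner each => inner.insert (some each) ([] : List Int))
            (PySem.Dict.ofList [(none, ([] : List Int))])))
        = (fun (city : PySem.Dict String (PySem.Dict (Option String) (List Int))) (i : String) =>
            city.insert i ((headers.foldl (fun t h => t.insert (some h) ([] : List Int))
              (PySem.Dict.ofList [(none, ([] : List Int))])).erase (some i))) := by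
    funext c i
    rw [pv_inner_eq]
  simp only [hfun]
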